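-- pv_equiv track=rewrite | github.com/pypi-data/pypi-mirror-85 | packages/chgksuite/chgksuite-0.7.0-py3-none-any.whl/chgksuite/composer.py | find_min_context_index
-- ===== SOURCE A (Python) =====
-- def find_min_context_index(structure):
--     types_ = [x[0] for x in structure]
--     try:
--         min_section = types_.index("section")
--     except ValueError:
--         min_section = None
--     try:
--         min_question = types_.index("Question")
--     except ValueError:
--         min_question = None
--     if min_section is not None and min_question is not None:
--         return min(min_section, min_question)
--     elif min_section is not None:
--         return min_section
--     else:
--         return min_question
-- ===== SOURCE B (Python) =====
-- def find_min_context_index(structure):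
--     for i, x in enumerate(structure):
--         if x[0] == "section" or x[0] == "Question":
--             return i
--     return None
-- ===== Notes on version B (the rewrite author's own statement) =====
-- stated objective: simpler
-- what changed: Replaces A's auxiliary types list, two list.index scans with exception handling, and the min/branch selection by a single enumerate loop that returns the first matching index.
import Mathlib
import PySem

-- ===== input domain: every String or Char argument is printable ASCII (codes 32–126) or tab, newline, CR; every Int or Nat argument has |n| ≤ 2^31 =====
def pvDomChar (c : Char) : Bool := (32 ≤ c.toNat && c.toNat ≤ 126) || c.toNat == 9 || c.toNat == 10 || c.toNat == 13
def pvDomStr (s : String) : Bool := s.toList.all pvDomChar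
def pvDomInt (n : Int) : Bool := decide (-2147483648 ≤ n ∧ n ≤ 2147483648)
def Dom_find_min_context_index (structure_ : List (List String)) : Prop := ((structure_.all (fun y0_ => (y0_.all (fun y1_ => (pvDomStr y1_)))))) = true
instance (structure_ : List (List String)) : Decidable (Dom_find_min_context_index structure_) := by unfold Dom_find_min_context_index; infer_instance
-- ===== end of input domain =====

-- B replaces A's auxiliary types list, two list.index scans and the min/branch selection
-- by one forward pass returning the first matching index (objective: simpler).

-- ===== PORT A =====
-- x[0] on a nonempty inner list (Pre_ guarantees nonemptiness; the getD default is never hit inside Pre_)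
def find_min_context_index (structure_ : List (List String)) : Option Int :=
  let types_ := structure_.map (fun x => (PySem.List.pyGet? x 0).getD "")
  let min_section := PySem.List.index? types_ "section"
  let min_question := PySem.List.index? types_ "Question"
  match min_section, min_question with
  | some s, some q => some (min (s : Int) (q : Int))
  | some s, none   => some (s : Int)
  | none,   q      => Option.map (fun n : Nat => (n : Int)) q

-- ===== PORT B =====
-- the enumerate loop: index counter i, stop at the first element whose head matches
def find_min_context_index_alt_go (xs : List (List String)) (i : Int) : Option Int :=
  match xs with
  | [] => none
  | x :: rest =>
    let h := (PySem.List.pyGet? x 0).getD ""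
    if h == "section" || h == "Question" then some i
    else find_min_context_index_alt_go rest (i + 1)

def find_min_context_index_alt (structure_ : List (List String)) : Option Int :=
  find_min_context_index_alt_go structure_ 0

-- ===== PRECONDITION & SPEC =====
-- Pre_ excludes exactly the inputs containing an empty inner list, on which A raises IndexError (x[0]).
def Pre_find_min_context_index (structure_ : List (List String)) : Prop :=
  ∀ x ∈ structure_, x ≠ []
instance (structure_ : List (List String)) : Decidable (Pre_find_min_context_index structure_) := by
  unfold Pre_find_min_context_index; infer_instance

def pvWitness_find_min_context_index : List (List String) :=
  [["intro"], ["Question", "text"], ["section"]]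

def Spec_find_min_context_index (structure_ : List (List String)) (out : Option Int) : Prop :=
  out = find_min_context_index_alt structure_
instance (structure_ : List (List String)) (out : Option Int) : Decidable (Spec_find_min_context_index structure_ out) := by
  unfold Spec_find_min_context_index; infer_instance

-- ===== CLAIM (what is proved, stated in full; the proofs are below) =====
def Claim_equal_find_min_context_index : Prop :=
  ∀ (structure_ : List (List String)), Dom_find_min_context_index structure_ →
    Pre_find_min_context_index structure_ →
    Spec_find_min_context_index structure_ (find_min_context_index structure_)

-- ===== LEMMAS AND PROOFS =====

def pvHd (x : List String) : String := (PySem.List.pyGet? x 0).getD ""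
def pvHit (x : List String) : Bool := pvHd x == "section" || pvHd x == "Question"

-- A's final min/branch selection, as a function of the two index results
def pvCombine (a b : Option Nat) : Option Int :=
  match a, b with
  | some s, some q => some (min (s : Int) (q : Int))
  | some s, none   => some (s : Int)
  | none,   q      => Option.map (fun n : Nat => (n : Int)) q

theorem pv_go_eq_findIdx? (xs : List (List String)) (i : Int) :
    find_min_context_index_alt_go xs i = (xs.findIdx? pvHit).map (fun n : Nat => i + (n : Int)) := by
  induction xs generalizing i with
  | nil => simp [find_min_context_index_alt_go]
  | cons x rest ih =>
    have hcond : ((PySem.List.pyGet? x 0).getD "" == "section"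
        || (PySem.List.pyGet? x 0).getD "" == "Question") = pvHit x := rfl
    simp only [find_min_context_index_alt_go, List.findIdx?_cons, hcond]
    cases hx : pvHit x with
    | true => simp
    | false =>
      rw [if_neg Bool.false_ne_true, if_neg Bool.false_ne_true, ih]
      cases List.findIdx? pvHit rest <;> simp <;> omega

theorem pv_combine_eq_findIdx? (ts : List String) :
    pvCombine (PySem.List.index? ts "section") (PySem.List.index? ts "Question")
    = (ts.findIdx? (fun t => t == "section" || t == "Question")).map (fun n : Nat => (n : Int)) := by
  induction ts with
  | nil =>
    simp [pvCombine, PySem.List.index?_eq_idxOf?, List.idxOf?]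
  | cons t ts ih =>
    rw [List.findIdx?_cons]
    by_cases hs : t = "section"
    · subst hs
      rw [PySem.List.index?_cons_self, PySem.List.index?_cons_of_ne ts (by decide)]
      cases h : PySem.List.index? ts "Question" <;> simp [pvCombine] <;> omega
    · by_cases hq : t = "Question"
      · subst hq
        rw [PySem.List.index?_cons_self, PySem.List.index?_cons_of_ne ts (by decide)]
        cases h : PySem.List.index? ts "section" <;> simp [pvCombine] <;> omega
      · rw [PySem.List.index?_cons_of_ne ts hs, PySem.List.index?_cons_of_ne ts hq]
        rw [if_neg (by simp [hs, hq])]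
        cases h1 : PySem.List.index? ts "section" <;>
          cases h2 : PySem.List.index? ts "Question" <;>
            simp only [h1, h2, Option.map_some, Option.map_none, Option.map_map, pvCombine] at ih ⊢ <;>
              cases h3 : ts.findIdx? (fun t => t == "section" || t == "Question") <;>
                simp [h3] at ih ⊢ <;> omega

-- ===== VERDICT (by name: the statement is the Claim_ definition above) =====
theorem find_min_context_index_spec : Claim_equal_find_min_context_index := by
  intro s _ _
  unfold Spec_find_min_context_index find_min_context_index_alt
  rw [pv_go_eq_findIdx?]
  have hA : find_min_context_index s
      = pvCombine (PySem.List.index? (s.map (fun x => (PySem.List.pyGet? x 0).getD "")) "section")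
                  (PySem.List.index? (s.map (fun x => (PySem.List.pyGet? x 0).getD "")) "Question") := rfl
  rw [hA, pv_combine_eq_findIdx?, List.findIdx?_map]
  have hp : ((fun t => t == "section" || t == "Question")
      ∘ fun x => (PySem.List.pyGet? x 0).getD "") = pvHit := rfl
  rw [hp]
  cases List.findIdx? pvHit s <;> simp
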